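-- pv_equiv track=rewrite | github.com/gunjanmodi/algorithms | programming/before/programs/rectangle_mania.py | get_coords_table
-- ===== SOURCE A (Python) =====
-- def get_coords_table(coords):
-- 	coords_table = {}
-- 	for coord1 in coords:
-- 		coord1_directions = {UP: [], RIGHT: [], DOWN: [], LEFT: []}
-- 		for coord2 in coords:
-- 			coord2_direction = get_coord_direction(coord1, coord2)
-- 			if coord2_direction in coord1_directions:
-- 				coord1_directions[coord2_direction].append(coord2)
-- 		coord1_string = coord_to_string(coord1)
-- 		coords_table[coord1_string] = coord1_directions
-- 	return coords_table
--
-- def get_coord_direction(coord1, coord2):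
-- 	direction = ''
-- 	x1, y1 = coord1
-- 	x2, y2 = coord2
-- 	if x1 == x2:
-- 		if y1 < y2:
-- 			direction = UP
-- 		elif y1 > y2:
-- 			direction = DOWN
-- 	elif y1 == y2:
-- 		if x1 < x2:
-- 			direction = RIGHT
-- 		elif x1 > x2:
-- 			direction = LEFT
-- 	return direction
--
-- def	coord_to_string(coord):
-- 	x, y = coord
-- 	return f"{x}-{y}"
--
-- UP = 'up'
--
-- RIGHT = 'right'
--
-- DOWN = 'down'
--
-- LEFT = 'left'
-- ===== SOURCE B (Python) =====
-- UP = 'up'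
-- RIGHT = 'right'
-- DOWN = 'down'
-- LEFT = 'left'
--
--
-- def get_coords_table(coords):
--     cols = {}
--     rows = {}
--     for c in coords:
--         cols.setdefault(c[0], []).append(c)
--         rows.setdefault(c[1], []).append(c)
--     table = {}
--     for x, y in coords:
--         col = cols[x]
--         row = rows[y]
--         table[f"{x}-{y}"] = {
--             UP: [c for c in col if c[1] > y],
--             RIGHT: [c for c in row if c[0] > x],
--             DOWN: [c for c in col if c[1] < y],
--             LEFT: [c for c in row if c[0] < x],
--         }
--     return table
-- ===== Notes on version B (the rewrite author's own statement) =====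
-- stated objective: faster
-- what changed: Instead of comparing every pair of coords (nested loops), B groups coords once into column/row buckets with order-preserving dicts and builds each coord's up/down/left/right lists by scanning only its own column and row.
import Mathlib
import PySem

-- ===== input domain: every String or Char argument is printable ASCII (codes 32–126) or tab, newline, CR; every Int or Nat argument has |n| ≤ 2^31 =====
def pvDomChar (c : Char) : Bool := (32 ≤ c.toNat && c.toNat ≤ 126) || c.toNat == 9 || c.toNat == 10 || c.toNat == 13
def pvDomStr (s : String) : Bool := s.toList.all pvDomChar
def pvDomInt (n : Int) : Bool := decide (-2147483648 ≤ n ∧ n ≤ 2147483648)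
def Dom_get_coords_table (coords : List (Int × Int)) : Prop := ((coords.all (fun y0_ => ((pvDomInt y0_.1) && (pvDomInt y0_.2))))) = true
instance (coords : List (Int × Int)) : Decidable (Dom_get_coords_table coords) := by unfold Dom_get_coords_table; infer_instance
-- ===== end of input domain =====

-- B replaces A's all-pairs double loop by one grouping pass into column/row buckets,
-- then scans only each coord's own column and row (asymptotically faster on sparse alignments).

-- ===== PORT A =====
-- coord_to_string (shared string formatting helper; f"{x}-{y}")
def pvCoordToString (c : Int × Int) : String :=
  String.ofList (PySem.Int.toChars c.1 ++ ['-'] ++ PySem.Int.toChars c.2)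

-- get_coord_direction
def pvDir (c1 c2 : Int × Int) : String :=
  if c1.1 = c2.1 then
    (if c1.2 < c2.2 then "up" else if c1.2 > c2.2 then "down" else "")
  else if c1.2 = c2.2 then
    (if c1.1 < c2.1 then "right" else if c1.1 > c2.1 then "left" else "")
  else ""

-- inner loop of A: for coord2 in coords: append coord2 to its direction bucket
def pvInnerA (c1 : Int × Int) (coords : List (Int × Int)) :
    PySem.Dict String (List (Int × Int)) :=
  coords.foldl (fun d c2 =>
      let dir := pvDir c1 c2
      if d.contains dir then d.modify dir [] (fun l => l ++ [c2]) else d)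
    (PySem.Dict.mk [("up", []), ("right", []), ("down", []), ("left", [])])

def get_coords_table (coords : List (Int × Int)) : List (String × List (String × List (Int × Int))) :=
  (coords.foldl (fun t c1 => t.insert (pvCoordToString c1) (pvInnerA c1 coords).items)
    PySem.Dict.empty).items

-- ===== PORT B =====
def get_coords_table_alt (coords : List (Int × Int)) : List (String × List (String × List (Int × Int))) :=
  let cols := coords.foldl (fun d c => d.modify c.1 [] (fun l => l ++ [c])) PySem.Dict.empty
  let rows := coords.foldl (fun d c => d.modify c.2 [] (fun l => l ++ [c])) PySem.Dict.empty
  (coords.foldl (fun t c =>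
      let col := cols.getD c.1 []
      let row := rows.getD c.2 []
      t.insert (pvCoordToString c)
        [("up",    col.filter (fun p => p.2 > c.2)),
         ("right", row.filter (fun p => p.1 > c.1)),
         ("down",  col.filter (fun p => p.2 < c.2)),
         ("left",  row.filter (fun p => p.1 < c.1))])
    PySem.Dict.empty).items

-- ===== PRECONDITION & SPEC =====
def Spec_get_coords_table (coords : List (Int × Int)) (out : List (String × List (String × List (Int × Int)))) : Prop := out = get_coords_table_alt coords
instance (coords : List (Int × Int)) (out : List (String × List (String × List (Int × Int)))) : Decidable (Spec_get_coords_table coords out) := by unfold Spec_get_coords_table; infer_instance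

-- ===== CLAIM (what is proved, stated in full; the proofs are below) =====
def Claim_equal_get_coords_table : Prop := ∀ (coords : List (Int × Int)), Dom_get_coords_table coords → Spec_get_coords_table coords (get_coords_table coords)

-- ===== LEMMAS AND PROOFS =====

-- grouping pass: looking up a key in the bucket dict yields exactly the aligned coords, in order
theorem pv_group_getD {α : Type} (key : α → Int)
    (coords : List α) (d : PySem.Dict Int (List α)) (x : Int) :
    (coords.foldl (fun d c => d.modify (key c) [] (fun l => l ++ [c])) d).getD x []
      = d.getD x [] ++ coords.filter (fun c => key c = x) := by
  induction coords generalizing d with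
  | nil => simp
  | cons c cs ih =>
    simp only [List.foldl_cons, List.filter_cons, ih]
    rw [PySem.Dict.getD_modify]
    by_cases h : x = key c
    · simp [h, List.append_assoc]
    · simp [h, Ne.symm h]

-- A's inner double-loop body equals four filters over coords (accumulator generalized)
theorem pv_innerA_inv (x1 y1 : Int) (coords : List (Int × Int))
    (a b cc dd : List (Int × Int)) :
    coords.foldl (fun d c2 =>
        let dir := pvDir (x1, y1) c2
        if d.contains dir then d.modify dir [] (fun l => l ++ [c2]) else d)
      (PySem.Dict.mk [("up", a), ("right", b), ("down", cc), ("left", dd)])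
    = PySem.Dict.mk
        [("up",    a ++ coords.filter (fun c2 => x1 = c2.1 ∧ y1 < c2.2)),
         ("right", b ++ coords.filter (fun c2 => y1 = c2.2 ∧ x1 < c2.1)),
         ("down",  cc ++ coords.filter (fun c2 => x1 = c2.1 ∧ c2.2 < y1)),
         ("left",  dd ++ coords.filter (fun c2 => y1 = c2.2 ∧ c2.1 < x1))] := by
  induction coords generalizing a b cc dd with
  | nil => simp
  | cons c2 cs ih =>
    obtain ⟨x2, y2⟩ := c2
    rw [List.foldl_cons]
    have hup : (PySem.Dict.mk [("up", a), ("right", b), ("down", cc), ("left", dd)]).modify "up" [] (fun l => l ++ [(x2, y2)]) = PySem.Dict.mk [("up", a ++ [(x2, y2)]), ("right", b), ("down", cc), ("left", dd)] := by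
      simp [PySem.Dict.modify, PySem.Dict.contains, PySem.Dict.insert, PySem.Dict.getD, PySem.Dict.get?]
    have hright : (PySem.Dict.mk [("up", a), ("right", b), ("down", cc), ("left", dd)]).modify "right" [] (fun l => l ++ [(x2, y2)]) = PySem.Dict.mk [("up", a), ("right", b ++ [(x2, y2)]), ("down", cc), ("left", dd)] := by
      simp [PySem.Dict.modify, PySem.Dict.contains, PySem.Dict.insert, PySem.Dict.getD, PySem.Dict.get?]
    have hdown : (PySem.Dict.mk [("up", a), ("right", b), ("down", cc), ("left", dd)]).modify "down" [] (fun l => l ++ [(x2, y2)]) = PySem.Dict.mk [("up", a), ("right", b), ("down", cc ++ [(x2, y2)]), ("left", dd)] := by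
      simp [PySem.Dict.modify, PySem.Dict.contains, PySem.Dict.insert, PySem.Dict.getD, PySem.Dict.get?]
    have hleft : (PySem.Dict.mk [("up", a), ("right", b), ("down", cc), ("left", dd)]).modify "left" [] (fun l => l ++ [(x2, y2)]) = PySem.Dict.mk [("up", a), ("right", b), ("down", cc), ("left", dd ++ [(x2, y2)])] := by
      simp [PySem.Dict.modify, PySem.Dict.contains, PySem.Dict.insert, PySem.Dict.getD, PySem.Dict.get?]
    by_cases hx : x1 = x2
    · rcases lt_trichotomy y1 y2 with hy | hy | hy
      · have hdir : pvDir (x1, y1) (x2, y2) = "up" := by simp [pvDir, hx, hy]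
        simp only [hdir]
        rw [if_pos (by simp [PySem.Dict.contains]), hup, ih]
        simp [List.filter_cons, hx, hy, hy.ne, lt_asymm hy, List.append_assoc]
      · have hdir : pvDir (x1, y1) (x2, y2) = "" := by simp [pvDir, hx, hy]
        simp only [hdir]
        rw [if_neg (by simp [PySem.Dict.contains]), ih]
        simp [hx, hy]
      · have hdir : pvDir (x1, y1) (x2, y2) = "down" := by simp [pvDir, hx, hy, hy.ne', lt_asymm hy]
        simp only [hdir]
        rw [if_pos (by simp [PySem.Dict.contains]), hdown, ih]
        simp [List.filter_cons, hx, hy, hy.ne', lt_asymm hy, List.append_assoc]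
    · by_cases hy : y1 = y2
      · rcases lt_trichotomy x1 x2 with hx2 | hx2 | hx2
        · have hdir : pvDir (x1, y1) (x2, y2) = "right" := by simp [pvDir, hx, hy, hx2]
          simp only [hdir]
          rw [if_pos (by simp [PySem.Dict.contains]), hright, ih]
          simp [hx, hy, hx2, lt_asymm hx2, List.append_assoc]
        · exact absurd hx2 hx
        · have hdir : pvDir (x1, y1) (x2, y2) = "left" := by simp [pvDir, hx, hy, hx2, lt_asymm hx2]
          simp only [hdir]
          rw [if_pos (by simp [PySem.Dict.contains]), hleft, ih]
          simp [hx, hy, hx2, lt_asymm hx2, List.append_assoc]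
      · have hdir : pvDir (x1, y1) (x2, y2) = "" := by simp [pvDir, hx, hy]
        simp only [hdir]
        rw [if_neg (by simp [PySem.Dict.contains]), ih]
        simp [hx, hy]

-- double filter over a bucket = single filter with the conjunction (per direction)
theorem pv_filter_bucket (coords : List (Int × Int)) (key cmp : (Int × Int) → Int)
    (k v : Int) :
    ((coords.filter (fun c => key c = k)).filter (fun p => v < cmp p))
      = coords.filter (fun c => k = key c ∧ v < cmp c) := by
  rw [List.filter_filter]
  exact List.filter_congr (fun c _ => by simp [eq_comm, Bool.and_comm])

theorem pv_filter_bucket' (coords : List (Int × Int)) (key cmp : (Int × Int) → Int)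
    (k v : Int) :
    ((coords.filter (fun c => key c = k)).filter (fun p => cmp p < v))
      = coords.filter (fun c => k = key c ∧ cmp c < v) := by
  rw [List.filter_filter]
  exact List.filter_congr (fun c _ => by simp [eq_comm, Bool.and_comm])

-- two insert-folds with the same keys and pointwise-equal values coincide
theorem pv_foldl_insert_congr {α κ ν : Type} [BEq κ] (key : α → κ) (F G : α → ν)
    (h : ∀ c, F c = G c) (l : List α) (t : PySem.Dict κ ν) :
    l.foldl (fun t c => t.insert (key c) (F c)) t
      = l.foldl (fun t c => t.insert (key c) (G c)) t := by
  rw [funext h]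

-- ===== VERDICT (by name: the statement is the Claim_ definition above) =====
theorem get_coords_table_spec : Claim_equal_get_coords_table := by
  intro coords _
  unfold Spec_get_coords_table get_coords_table get_coords_table_alt
  refine congrArg PySem.Dict.items
    (pv_foldl_insert_congr pvCoordToString
      (fun c => (pvInnerA c coords).items)
      (fun c =>
        let col := (coords.foldl (fun d c => d.modify c.1 [] (fun l => l ++ [c]))
          PySem.Dict.empty).getD c.1 []
        let row := (coords.foldl (fun d c => d.modify c.2 [] (fun l => l ++ [c]))
          PySem.Dict.empty).getD c.2 []
        [("up",    col.filter (fun p => p.2 > c.2)),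
         ("right", row.filter (fun p => p.1 > c.1)),
         ("down",  col.filter (fun p => p.2 < c.2)),
         ("left",  row.filter (fun p => p.1 < c.1))])
      (fun c => ?_) coords PySem.Dict.empty)
  obtain ⟨x, y⟩ := c
  show (pvInnerA (x, y) coords).items = _
  unfold pvInnerA
  rw [pv_innerA_inv x y coords [] [] [] []]
  simp only [gt_iff_lt]
  rw [pv_group_getD (fun c : Int × Int => c.1) coords PySem.Dict.empty x,
      pv_group_getD (fun c : Int × Int => c.2) coords PySem.Dict.empty y]
  simp only [PySem.Dict.getD, PySem.Dict.get?, PySem.Dict.empty, List.find?_nil,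
    Option.map_none, Option.getD_none, List.nil_append]
  rw [pv_filter_bucket coords (fun c => c.1) (fun c => c.2) x y,
      pv_filter_bucket coords (fun c => c.2) (fun c => c.1) y x,
      pv_filter_bucket' coords (fun c => c.1) (fun c => c.2) x y,
      pv_filter_bucket' coords (fun c => c.2) (fun c => c.1) y x]
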